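-- pv_equiv track=rewrite | github.com/Xinshi0726/Federated_URP | Non-Fed-models/ID3.py | poll
-- ===== SOURCE A (Python) =====
-- def poll(series):
--     stat = dict()
--     for i in series:
--         stat[i] = 0
--     for i in series:
--         stat[i] += 1
--     max_num = list(stat.keys())[0]
--     for key in stat.keys():
--         if stat[max_num]<stat[key]:
--             max_num = key
--     return max_num
-- ===== SOURCE B (Python) =====
-- def poll(series):
--     # Mode by successive partitioning: repeatedly split off all occurrences of the
--     # leading value, keep the best (strictly larger count wins, so first-seen wins ties).
--     best = series[0]
--     best_count = 0
--     rest = series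
--     while rest:
--         head = rest[0]
--         c = 0
--         nxt = []
--         for x in rest:
--             if x == head:
--                 c += 1
--             else:
--                 nxt.append(x)
--         if best_count < c:
--             best, best_count = head, c
--         rest = nxt
--     return best
-- ===== Notes on version B (the rewrite author's own statement) =====
-- stated objective: alternative
-- what changed: B drops A's frequency dictionary entirely: it repeatedly partitions the list into the leading value's occurrences and the remainder, counting each distinct value as it is split off and keeping a running best, instead of A's three dict passes (zero-fill, increment, arg-max scan over the keys).
-- outside the precondition, e.g. on poll([]): A raises IndexError, B raises IndexError
import Mathlib
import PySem

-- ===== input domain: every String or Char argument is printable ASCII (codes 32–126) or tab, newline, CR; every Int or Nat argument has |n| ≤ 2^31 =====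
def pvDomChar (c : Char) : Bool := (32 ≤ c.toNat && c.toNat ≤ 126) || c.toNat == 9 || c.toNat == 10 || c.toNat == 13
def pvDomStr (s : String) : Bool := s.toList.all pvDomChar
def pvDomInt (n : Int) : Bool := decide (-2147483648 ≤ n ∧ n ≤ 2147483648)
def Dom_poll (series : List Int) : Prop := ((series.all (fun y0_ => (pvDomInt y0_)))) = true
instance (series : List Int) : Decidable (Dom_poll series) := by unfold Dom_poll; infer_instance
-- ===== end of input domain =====

-- B computes the mode with no dictionary at all: it repeatedly partitions the list into the
-- leading value's occurrences and the remainder, keeping a running best; objective: alternative.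

-- ===== PORT A =====
def poll (series : List Int) : Int :=
  -- stat = dict(); for i in series: stat[i] = 0
  let stat0 := series.foldl (fun d i => d.insert i (0 : Int)) (PySem.Dict.empty : PySem.Dict Int Int)
  -- for i in series: stat[i] += 1   (key always present, so getD-based modify is exact)
  let stat := series.foldl (fun d i => d.modify i 0 (fun x => x + 1)) stat0
  -- max_num = list(stat.keys())[0]   (IndexError on empty series → excluded by Pre_)
  let max_num := (PySem.List.pyGet? stat.keys 0).getD 0
  -- for key in stat.keys(): if stat[max_num] < stat[key]: max_num = key
  stat.keys.foldl (fun m k => if stat.getD m 0 < stat.getD k 0 then k else m) max_num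

-- ===== PORT B =====
-- one round of B's while loop: single pass over `rest` counting the head and collecting the others
theorem pollScan_spec (h : Int) (l : List Int) (c0 : Int) (n0 : List Int) :
    l.foldl (fun (acc : Int × List Int) x =>
        if x = h then (acc.1 + 1, acc.2) else (acc.1, acc.2 ++ [x])) (c0, n0)
      = (c0 + (l.count h : Int), n0 ++ l.filter (fun y => y ≠ h)) := by
  induction l generalizing c0 n0 with
  | nil => simp
  | cons x t ih =>
      by_cases hx : x = h
      · subst hx; simp [ih]; ring
      · simp [hx, ih]

-- the while loop of B: in each round split `rest` at its leading value
def pollLoop (rest : List Int) (best : Int) (bestCount : Int) : Int :=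
  match rest with
  | [] => best
  | headEl :: tail =>
      match hscan : (headEl :: tail).foldl (fun (acc : Int × List Int) x =>
          if x = headEl then (acc.1 + 1, acc.2) else (acc.1, acc.2 ++ [x])) ((0 : Int), ([] : List Int)) with
      | (c, nxt) =>
          if bestCount < c then pollLoop nxt headEl c else pollLoop nxt best bestCount
termination_by rest.length
decreasing_by
  all_goals
    simp only [dite_eq_ite] at hscan
    rw [pollScan_spec] at hscan
    injection hscan with h1 h2
    subst h2
    have hle := List.length_filter_le (fun y : Int => decide (y ≠ headEl)) tail
    simp only [List.nil_append, List.filter_cons, List.length_cons, ne_eq,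
      not_true_eq_false, decide_false, Bool.false_eq_true, if_false] at hle ⊢
    omega

def poll_alt (series : List Int) : Int :=
  match series with
  | [] => 0  -- best = series[0] raises IndexError in Python; excluded by Pre_
  | s0 :: t => pollLoop (s0 :: t) s0 0

-- ===== PRECONDITION & SPEC =====
-- Pre_ excludes only the empty series, on which both A and B raise IndexError.
def Pre_poll (series : List Int) : Prop := series ≠ []
instance (series : List Int) : Decidable (Pre_poll series) := by unfold Pre_poll; infer_instance
def pvWitness_poll : List Int := [1, 1, 2]

def Spec_poll (series : List Int) (out : Int) : Prop := out = poll_alt series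
instance (series : List Int) (out : Int) : Decidable (Spec_poll series out) := by unfold Spec_poll; infer_instance

-- ===== CLAIM (what is proved, stated in full; the proofs are below) =====
def Claim_equal_poll : Prop := ∀ (series : List Int), Dom_poll series → Pre_poll series → Spec_poll series (poll series)

-- ===== LEMMAS AND PROOFS =====

-- a fold of insert-0 leaves every getD-with-default-0 at 0
theorem getD_foldl_insert_zero (l : List Int) (d : PySem.Dict Int Int) (v : Int)
    (h : d.getD v 0 = 0) :
    (l.foldl (fun d i => d.insert i (0 : Int)) d).getD v 0 = 0 := by
  induction l generalizing d with
  | nil => simpa using h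
  | cons x t ih =>
      simp only [List.foldl_cons]
      exact ih _ (by rw [PySem.Dict.getD_insert]; split <;> simp [h])

-- updating a set with elements it already has is the identity
theorem Set_update_of_subset (l : List Int) (s : PySem.Set Int)
    (h : ∀ x ∈ l, x ∈ s) : s.update l = s := by
  induction l generalizing s with
  | nil => exact PySem.Set.update_nil s
  | cons x t ih =>
      have hx : PySem.Set.add s x = s := by
        unfold PySem.Set.add
        rw [if_pos ((PySem.Set.contains_iff s x).mpr (h x (List.mem_cons_self)))]
      show (PySem.Set.add s x).update t = s
      rw [hx]
      exact ih s (fun y hy => h y (List.mem_cons_of_mem _ hy))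

-- Set.add, spelled out (used to rewrite closed occurrences only)
theorem Set_add_eq (s : PySem.Set Int) (x : Int) :
    PySem.Set.add s x = if PySem.Set.contains s x then s else s ++ [x] := rfl

-- folding Set.add only ever appends: the accumulator is a prefix of the result
theorem foldl_add_prefix (l : List Int) (s : List Int) :
    ∃ r, l.foldl PySem.Set.add s = s ++ r := by
  induction l generalizing s with
  | nil => exact ⟨[], by simp⟩
  | cons x t ih =>
      simp only [List.foldl_cons]
      by_cases hx : PySem.Set.contains s x
      · rw [Set_add_eq s x, if_pos hx]; exact ih s
      · rw [Set_add_eq s x, if_neg hx]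
        obtain ⟨r, hr⟩ := ih (s ++ [x])
        exact ⟨x :: r, by simpa [List.append_assoc] using hr⟩

-- Set.ofList commutes with filter
theorem foldl_add_filter (p : Int → Bool) (l : List Int) (s : List Int) :
    (l.filter p).foldl PySem.Set.add (s.filter p) = (l.foldl PySem.Set.add s).filter p := by
  induction l generalizing s with
  | nil => rfl
  | cons x t ih =>
      by_cases hp : p x = true
      · have hcont : PySem.Set.contains (s.filter p) x = PySem.Set.contains s x := by
          by_cases hm : x ∈ s
          · rw [(PySem.Set.contains_iff _ x).mpr (List.mem_filter.mpr ⟨hm, hp⟩),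
                (PySem.Set.contains_iff s x).mpr hm]
          · have h1 : ¬ PySem.Set.contains (s.filter p) x = true := fun hc =>
              hm (List.mem_filter.mp ((PySem.Set.contains_iff _ x).mp hc)).1
            have h2 : ¬ PySem.Set.contains s x = true := fun hc =>
              hm ((PySem.Set.contains_iff s x).mp hc)
            simp only [Bool.not_eq_true] at h1 h2
            rw [h1, h2]
        have hadd : PySem.Set.add (s.filter p) x = (PySem.Set.add s x).filter p := by
          rw [Set_add_eq, Set_add_eq, hcont]
          by_cases hc : PySem.Set.contains s x = true
          · simp [(PySem.Set.contains_iff s x).mp hc]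
          · have hm : x ∉ s := fun m => hc ((PySem.Set.contains_iff s x).mpr m)
            simp [hm, List.filter_append, hp]
        simp only [List.filter_cons, hp, if_pos, List.foldl_cons, hadd]
        exact ih (PySem.Set.add s x)
      · have hpf : p x = false := by simpa using hp
        have hadd : (PySem.Set.add s x).filter p = s.filter p := by
          rw [Set_add_eq]
          by_cases hc : PySem.Set.contains s x = true
          · simp [(PySem.Set.contains_iff s x).mp hc]
          · have hm : x ∉ s := fun m => hc ((PySem.Set.contains_iff s x).mpr m)
            simp [hm, List.filter_append, hpf]
        simp only [List.filter_cons, hpf, Bool.false_eq_true, if_false, List.foldl_cons]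
        rw [← hadd, ih (PySem.Set.add s x)]

-- peeling the head off an ofList: the remaining distinct values are those of the filtered rest
theorem ofList_cons_filter (h : Int) (t : List Int) :
    PySem.Set.ofList (h :: t)
      = h :: PySem.Set.ofList ((h :: t).filter (fun y => y ≠ h)) := by
  obtain ⟨r, hr⟩ := foldl_add_prefix t [h]
  have hof : PySem.Set.ofList (h :: t) = h :: r := by
    rw [PySem.Set.ofList_eq_foldl]
    simpa using hr
  have hnd : (h :: r).Nodup := hof ▸ PySem.Set.nodup_ofList (h :: t)
  have hfil : PySem.Set.ofList ((h :: t).filter (fun y => y ≠ h))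
      = (PySem.Set.ofList (h :: t)).filter (fun y => y ≠ h) := by
    rw [PySem.Set.ofList_eq_foldl, PySem.Set.ofList_eq_foldl]
    exact foldl_add_filter (fun y => y ≠ h) (h :: t) []
  rw [hof] at hfil ⊢
  rw [hfil]
  simp only [List.filter_cons, decide_not, ne_eq]
  congr 1
  · exact (List.filter_eq_self.mpr (fun y hy => by
      have : y ≠ h := fun he => (List.nodup_cons.mp hnd).1 (he ▸ hy)
      simp [this])).symm

-- B's loop computes A's arg-max scan over the distinct values, given exact counts
theorem pollLoop_argmax (F : Int → Int) :
    ∀ (n : Nat) (l : List Int), l.length ≤ n →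
      (∀ k ∈ l, (l.count k : Int) = F k) → ∀ best,
      pollLoop l best (F best)
        = (PySem.Set.ofList l).foldl (fun m k => if F m < F k then k else m) best := by
  intro n
  induction n with
  | zero =>
      intro l hl _ best
      have : l = [] := List.length_eq_zero_iff.mp (Nat.le_zero.mp hl)
      subst this; rw [pollLoop]; rfl
  | succ n ih =>
      intro l hl hc best
      match l with
      | [] => rw [pollLoop]; rfl
      | h :: t =>
          rw [pollLoop, pollScan_spec]
          simp only [List.nil_append]
          have hfil : (h :: t).filter (fun y => y ≠ h) = t.filter (fun y => y ≠ h) := by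
            simp
          have hch : ((h :: t).count h : Int) = F h := hc h List.mem_cons_self
          have hlen : (t.filter (fun y => y ≠ h)).length ≤ n := by
            have := List.length_filter_le (fun y => decide ¬y = h) t
            simp only [List.length_cons] at hl
            simpa using Nat.le_trans (by simpa [decide_not] using this) (Nat.le_of_succ_le_succ hl)
          have hc' : ∀ k ∈ (h :: t).filter (fun y => y ≠ h),
              (((h :: t).filter (fun y => y ≠ h)).count k : Int) = F k := by
            intro k hk
            have hmem := List.mem_filter.mp hk
            have hkne : k ≠ h := by simpa using hmem.2
            rw [List.count_filter (by simpa using hkne)]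
            exact hc k hmem.1
          rw [ofList_cons_filter h t, List.foldl_cons]
          rw [hfil] at hc' ⊢
          simp only [zero_add]
          rw [hch]
          by_cases hlt : F best < F h
          · rw [if_pos hlt, if_pos hlt]
            exact ih (t.filter (fun y => y ≠ h)) hlen hc' h
          · rw [if_neg hlt, if_neg hlt]
            exact ih (t.filter (fun y => y ≠ h)) hlen hc' best

-- ===== VERDICT (by name: the statement is the Claim_ definition above) =====
theorem poll_spec : Claim_equal_poll := by
  intro series _ hne
  simp only [Spec_poll, poll]
  -- name the two dicts
  set stat0 := series.foldl (fun d i => d.insert i (0 : Int)) (PySem.Dict.empty : PySem.Dict Int Int) with hs0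
  set stat := series.foldl (fun d i => d.modify i 0 (fun x => x + 1)) stat0 with hs
  -- counts: stat.getD v 0 = series.count v
  have hc : ∀ v, stat.getD v 0 = (series.count v : Int) := by
    intro v
    rw [hs, PySem.Dict.getD_foldl_modify_add_one,
        getD_foldl_insert_zero series PySem.Dict.empty v (PySem.Dict.getD_empty v 0)]
    ring
  -- keys: stat.keys = Set.ofList series
  have hk0 : stat0.keys = PySem.Set.ofList series := by
    rw [hs0, PySem.Dict.keys_foldl_insert series (fun _ _ => (0 : Int)) PySem.Dict.empty]
    rw [PySem.Dict.keys_empty]; rfl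
  have hk : stat.keys = PySem.Set.ofList series := by
    have : stat = series.foldl (fun d i => d.insert i (d.getD i 0 + 1)) stat0 := by
      rw [hs]; rfl
    rw [this, PySem.Dict.keys_foldl_insert series (fun d i => d.getD i 0 + 1) stat0, hk0]
    exact Set_update_of_subset series _ (fun x hx => (PySem.Set.mem_ofList series x).mpr hx)
  -- series and its distinct list both start with the same head
  obtain ⟨s0, t, rfl⟩ := List.exists_cons_of_ne_nil hne
  have hcons : PySem.Set.ofList (s0 :: t)
      = s0 :: PySem.Set.ofList ((s0 :: t).filter (fun y => y ≠ s0)) := ofList_cons_filter s0 t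
  set xs := PySem.Set.ofList ((s0 :: t).filter (fun y => y ≠ s0)) with hxs
  rw [hk, hcons]
  -- A's side: head lookup and the strict-< scan
  have hget : PySem.List.pyGet? (s0 :: xs) 0 = some s0 := by
    simp [PySem.List.pyGet?, PySem.List.pyIdx?]
  rw [hget]
  simp only [Option.getD_some, List.foldl_cons, ite_self]
  have hfun : (fun (m k : Int) => if stat.getD m 0 < stat.getD k 0 then k else m)
      = (fun (m k : Int) => if ((s0 :: t).count m : Int) < ((s0 :: t).count k : Int) then k else m) := by
    funext m k; rw [hc m, hc k]
  rw [hfun]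
  -- B's side: unroll the first round of the loop, then the arg-max lemma
  show _ = poll_alt (s0 :: t)
  simp only [poll_alt]
  rw [pollLoop, pollScan_spec]
  simp only [List.nil_append, zero_add]
  have hpos : (0 : Int) < ((s0 :: t).count s0 : Int) := by
    exact_mod_cast List.count_pos_iff.mpr List.mem_cons_self
  rw [if_pos hpos]
  have hfil : (s0 :: t).filter (fun y => y ≠ s0) = t.filter (fun y => y ≠ s0) := by simp
  set F : Int → Int := fun k => ((s0 :: t).count k : Int) with hF
  have hcF : ∀ k ∈ (s0 :: t).filter (fun y => y ≠ s0),
      (((s0 :: t).filter (fun y => y ≠ s0)).count k : Int) = F k := by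
    intro k hk
    have hmem := List.mem_filter.mp hk
    have hkne : k ≠ s0 := by simpa using hmem.2
    rw [List.count_filter (by simpa using hkne)]
  have hFs0 : ((s0 :: t).count s0 : Int) = F s0 := rfl
  rw [hfil] at hcF
  have := pollLoop_argmax F (t.filter (fun y => y ≠ s0)).length
      (t.filter (fun y => y ≠ s0)) le_rfl hcF s0
  rw [hFs0, hfil, this, hxs, hfil]
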